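-- pv_equiv track=rewrite | github.com/jmjac/advent_of_code_2020 | day_21/main.py | find_allergens
-- ===== SOURCE A (Python) =====
-- def find_allergens(count, allergens):
--     most_likely = {a:(0,set()) for a in allergens}
--     for food in count:
--         for a in count[food]:
--             if a == "dishes":
--                 continue
--             if count[food][a] > most_likely[a][0]:
--                 most_likely[a] = (count[food][a], {food})
--             elif count[food][a] == most_likely[a][0]:
--                 most_likely[a][1].add(food)
--
--     found_allergens = set()
--     for i in most_likely.values():
--         for j in i[1]:
--             found_allergens.add(j)
--     return found_allergens, most_likely
-- ===== SOURCE B (Python) =====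
-- def find_allergens(count, allergens):
--     most_likely = {}
--     for a in allergens:
--         if a == "dishes":
--             cand = []
--         else:
--             cand = [(f, d[a]) for f, d in count.items() if a in d]
--         m = max([0] + [v for _, v in cand])
--         most_likely[a] = (m, {f for f, v in cand if v == m})
--     found_allergens = {f for _, fs in most_likely.values() for f in fs}
--     return found_allergens, most_likely
-- ===== Notes on version B (the rewrite author's own statement) =====
-- stated objective: alternative
-- what changed: B traverses allergen-major: for each allergen it collects all (food, count) candidates in one pass over count, takes m = max(0, values) and the foods attaining m, instead of A's food-major incremental running-max with in-place set mutation.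
import Mathlib
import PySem

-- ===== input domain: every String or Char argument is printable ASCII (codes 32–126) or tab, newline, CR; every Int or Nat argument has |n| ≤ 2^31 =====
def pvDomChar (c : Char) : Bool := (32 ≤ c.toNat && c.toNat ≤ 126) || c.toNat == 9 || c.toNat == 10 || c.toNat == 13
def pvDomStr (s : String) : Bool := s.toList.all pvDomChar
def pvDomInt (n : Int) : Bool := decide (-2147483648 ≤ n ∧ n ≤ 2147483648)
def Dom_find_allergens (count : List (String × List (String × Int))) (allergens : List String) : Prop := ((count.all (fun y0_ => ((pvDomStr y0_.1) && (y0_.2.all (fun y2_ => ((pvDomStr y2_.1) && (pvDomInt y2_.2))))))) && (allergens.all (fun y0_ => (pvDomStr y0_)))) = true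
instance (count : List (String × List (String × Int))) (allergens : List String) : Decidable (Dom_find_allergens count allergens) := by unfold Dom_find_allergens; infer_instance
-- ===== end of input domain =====

-- B computes each allergen's entry allergen-major (collect candidates, then max and the foods attaining it)
-- instead of A's food-major running-max; equivalence of the return values is proved on Pre_ (no KeyError).

-- ===== PORT A =====
def find_allergens (count : List (String × List (String × Int))) (allergens : List String) : List String × (List (String × Int × List String)) :=
  let init : PySem.Dict String (Int × List String) :=
    allergens.foldl (fun d a => d.insert a (0, ([] : List String))) PySem.Dict.empty
  let most_likely : PySem.Dict String (Int × List String) :=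
    count.foldl (fun ml p =>
      p.2.foldl (fun ml q =>
        if q.1 == "dishes" then ml
        else
          let v : Int := (PySem.Dict.mk p.2).getD q.1 0          -- count[food][a] (first match)
          let cur := ml.getD q.1 (0, ([] : List String))          -- most_likely[a]; Pre_ rules out KeyError
          if v > cur.1 then ml.insert q.1 (v, [p.1])
          else if v == cur.1 then ml.insert q.1 (cur.1, PySem.Set.add cur.2 p.1)
          else ml) ml) init
  let found_allergens : List String :=
    most_likely.values.foldl (fun s i => i.2.foldl (fun s j => PySem.Set.add s j) s) ([] : List String)
  (found_allergens, most_likely.items)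

-- ===== PORT B =====
def find_allergens_alt (count : List (String × List (String × Int))) (allergens : List String) : List String × (List (String × Int × List String)) :=
  let most_likely : PySem.Dict String (Int × List String) :=
    allergens.foldl (fun d a =>
      let cand : List (String × Int) :=
        if a == "dishes" then []
        else count.filterMap (fun p => ((PySem.Dict.mk p.2).get? a).map (fun v => (p.1, v)))
      let m : Int := (cand.map (·.2)).foldl max 0
      d.insert a (m, PySem.Set.ofList ((cand.filter (fun fv => fv.2 == m)).map (·.1)))) PySem.Dict.empty
  let found_allergens : List String := PySem.Set.ofList (most_likely.values.flatMap (·.2))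
  (found_allergens, most_likely.items)

-- ===== PRECONDITION & SPEC =====
-- Pre_ excludes exactly the inputs where A raises KeyError: some food listing an allergen
-- (other than "dishes") that is not in the allergens list.
def Pre_find_allergens (count : List (String × List (String × Int))) (allergens : List String) : Prop :=
  ∀ p ∈ count, ∀ q ∈ p.2, q.1 = "dishes" ∨ q.1 ∈ allergens
instance (count : List (String × List (String × Int))) (allergens : List String) : Decidable (Pre_find_allergens count allergens) := by unfold Pre_find_allergens; infer_instance
def pvWitness_find_allergens : (List (String × List (String × Int))) × List String :=
  ([("bread", [("soy", 2), ("dishes", 1)]), ("stew", [("soy", 2), ("nuts", 0)])], ["soy", "nuts"])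

def Spec_find_allergens (count : List (String × List (String × Int))) (allergens : List String) (out : List String × (List (String × Int × List String))) : Prop := out = find_allergens_alt count allergens
instance (count : List (String × List (String × Int))) (allergens : List String) (out : List String × (List (String × Int × List String))) : Decidable (Spec_find_allergens count allergens out) := by unfold Spec_find_allergens; infer_instance

-- ===== CLAIM (what is proved, stated in full; the proofs are below) =====
def Claim_equal_find_allergens : Prop := ∀ (count : List (String × List (String × Int))) (allergens : List String), Dom_find_allergens count allergens → Pre_find_allergens count allergens → Spec_find_allergens count allergens (find_allergens count allergens)

-- ===== LEMMAS AND PROOFS =====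

-- A's per-allergen update step: running maximum with the set of foods attaining it.
def pvStep (x : Int × List String) (fv : String × Int) : Int × List String :=
  if fv.2 > x.1 then (fv.2, [fv.1])
  else if fv.2 == x.1 then (x.1, PySem.Set.add x.2 fv.1)
  else x

-- B's candidate list for allergen a ("dishes" contributes nothing).
def pvCols (count : List (String × List (String × Int))) (a : String) : List (String × Int) :=
  if a == "dishes" then []
  else count.filterMap (fun p => ((PySem.Dict.mk p.2).get? a).map (fun v => (p.1, v)))

-- A's inner-loop body for food (f, L) (the lookup dict stays the whole row L).
def pvInnerBody (f : String) (L : List (String × Int))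
    (ml : PySem.Dict String (Int × List String)) (q : String × Int) :
    PySem.Dict String (Int × List String) :=
  if q.1 == "dishes" then ml
  else
    let v : Int := (PySem.Dict.mk L).getD q.1 0
    let cur := ml.getD q.1 (0, ([] : List String))
    if v > cur.1 then ml.insert q.1 (v, [f])
    else if v == cur.1 then ml.insert q.1 (cur.1, PySem.Set.add cur.2 f)
    else ml

-- A's most_likely dict after the main loop, and B's most_likely dict.
def pvMainA (count : List (String × List (String × Int))) (allergens : List String) :
    PySem.Dict String (Int × List String) :=
  count.foldl (fun ml p => p.2.foldl (pvInnerBody p.1 p.2) ml)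
    (allergens.foldl (fun d a => d.insert a (0, ([] : List String))) PySem.Dict.empty)

def pvVal (count : List (String × List (String × Int))) (a : String) : Int × List String :=
  (((pvCols count a).map (·.2)).foldl max 0,
    PySem.Set.ofList (((pvCols count a).filter
      (fun fv => fv.2 == ((pvCols count a).map (·.2)).foldl max 0)).map (·.1)))

def pvB (count : List (String × List (String × Int))) (allergens : List String) :
    PySem.Dict String (Int × List String) :=
  allergens.foldl (fun d a => d.insert a (pvVal count a)) PySem.Dict.empty

lemma pvStep_idem (x : Int × List String) (fv : String × Int) :
    pvStep (pvStep x fv) fv = pvStep x fv := by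
  rcases x with ⟨m, s⟩; rcases fv with ⟨f, v⟩
  simp only [pvStep]
  by_cases h1 : v > m
  · simp [h1]
  · by_cases h2 : v = m
    · subst h2
      simp
    · simp [h1, h2]

-- getD over a fold of unconditional inserts keyed by the element.
lemma pvGetD_foldl_insert (xs : List String) (F : String → Int × List String)
    (d : PySem.Dict String (Int × List String)) (a : String) :
    (xs.foldl (fun d x => d.insert x (F x)) d).getD a (0, []) =
      if a ∈ xs then F a else d.getD a (0, []) := by
  induction xs generalizing d with
  | nil => simp
  | cons x xs ih =>
    simp only [List.foldl_cons, ih, List.mem_cons]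
    rcases Decidable.em (a ∈ xs) with h | h
    · simp [h]
    · rcases Decidable.em (a = x) with h2 | h2
      · simp [h2, PySem.Dict.getD_insert_self]
      · simp [h, h2, PySem.Dict.getD_insert_of_ne _ _ _ h2]

-- projection of the inner loop to one key a ≠ "dishes"
lemma pvInner_getD_ne (f : String) (L l : List (String × Int))
    (d : PySem.Dict String (Int × List String)) (a : String) (ha : a ≠ "dishes") :
    (l.foldl (pvInnerBody f L) d).getD a (0, []) =
      if a ∈ l.map (·.1) then pvStep (d.getD a (0, [])) (f, (PySem.Dict.mk L).getD a 0)
      else d.getD a (0, []) := by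
  induction l generalizing d with
  | nil => simp
  | cons q l ih =>
    rcases q with ⟨k, w⟩
    by_cases he : a = k
    · subst he
      simp only [List.foldl_cons, ih, List.map_cons, List.mem_cons]
      have hbody : (pvInnerBody f L d (a, w)).getD a (0, []) =
          pvStep (d.getD a (0, [])) (f, (PySem.Dict.mk L).getD a 0) := by
        simp only [pvInnerBody, pvStep, beq_iff_eq, if_neg ha]
        split_ifs <;> simp_all [PySem.Dict.getD_insert_self]
      by_cases hm : a ∈ l.map (·.1)
      · rw [if_pos hm, hbody, pvStep_idem]; simp
      · rw [if_neg hm, hbody]; simp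
    · simp only [List.foldl_cons, ih, List.map_cons, List.mem_cons]
      have hbody : (pvInnerBody f L d (k, w)).getD a (0, []) = d.getD a (0, []) := by
        simp only [pvInnerBody]
        split_ifs <;> first | rfl | (exact PySem.Dict.getD_insert_of_ne _ _ _ he)
      rw [hbody]
      by_cases hm : a ∈ l.map (·.1) <;> simp [hm, he]

lemma pvInner_getD_dishes (f : String) (L l : List (String × Int))
    (d : PySem.Dict String (Int × List String)) :
    (l.foldl (pvInnerBody f L) d).getD "dishes" (0, []) = d.getD "dishes" (0, []) := by
  induction l generalizing d with
  | nil => simp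
  | cons q l ih =>
    rw [List.foldl_cons, ih]
    by_cases hq : q.1 = "dishes"
    · simp [pvInnerBody, hq]
    · have hne : ¬ ("dishes" : String) = q.1 := fun h => hq h.symm
      simp only [pvInnerBody]
      split_ifs <;> first | rfl | (exact PySem.Dict.getD_insert_of_ne _ _ _ hne)

-- membership of a among the keys of a row decides whether get? finds a value
lemma pvMem_keys_iff_get? (L : List (String × Int)) (a : String) :
    a ∈ L.map (·.1) ↔ ((PySem.Dict.mk L).get? a).isSome := by
  rw [← PySem.Dict.contains_eq_isSome_get?]
  have h := PySem.Dict.contains_iff_mem_keys (d := PySem.Dict.mk L) (k := a)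
  simp_all [PySem.Dict.keys_mk]

-- projection of A's whole main loop to one key: a fold of pvStep over B's candidates
lemma pvMain_getD (count : List (String × List (String × Int)))
    (d : PySem.Dict String (Int × List String)) (a : String) :
    (count.foldl (fun ml p => p.2.foldl (pvInnerBody p.1 p.2) ml) d).getD a (0, []) =
      (pvCols count a).foldl pvStep (d.getD a (0, [])) := by
  rcases Decidable.em (a = "dishes") with ha | ha
  · subst ha
    simp only [pvCols, BEq.rfl, if_true, List.foldl_nil]
    induction count generalizing d with
    | nil => simp
    | cons p count ih => simp [List.foldl_cons, ih, pvInner_getD_dishes]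
  · induction count generalizing d with
    | nil => simp [pvCols, ha]
    | cons p count ih =>
      have hc : pvCols (p :: count) a =
          (if ((PySem.Dict.mk p.2).get? a).isSome
            then [(p.1, (PySem.Dict.mk p.2).getD a 0)] else []) ++ pvCols count a := by
        simp only [pvCols, beq_iff_eq, if_neg ha, List.filterMap_cons]
        rcases ho : (PySem.Dict.mk p.2).get? a with _ | v <;>
          simp [PySem.Dict.getD_eq_get?_getD, ho]
      rw [List.foldl_cons, ih, pvInner_getD_ne _ _ _ _ _ ha, hc]
      rcases Decidable.em (a ∈ p.2.map (·.1)) with hm | hm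
      · have hs := (pvMem_keys_iff_get? p.2 a).mp hm
        rw [if_pos hm, if_pos hs, List.cons_append, List.nil_append, List.foldl_cons]
      · have hs : ¬ ((PySem.Dict.mk p.2).get? a).isSome := fun h => hm ((pvMem_keys_iff_get? p.2 a).mpr h)
        rw [if_neg hm, if_neg hs, List.nil_append]

-- B's collect-then-reduce value IS the fold of A's step over the same candidates
lemma pvStep_fold (cols : List (String × Int)) :
    cols.foldl pvStep (0, ([] : List String)) =
      ((cols.map (·.2)).foldl max 0,
        PySem.Set.ofList ((cols.filter (fun fv => fv.2 == (cols.map (·.2)).foldl max 0)).map (·.1))) := by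
  induction cols using List.reverseRecOn with
  | nil => simp
  | append_singleton cols fv ih =>
    have hmax := PySem.List.le_foldl_max (cols.map (·.2)) 0
    rw [List.foldl_append, List.foldl_cons, List.foldl_nil, ih]
    simp only [List.map_append, List.foldl_append, List.map_cons, List.map_nil,
      List.foldl_cons, List.foldl_nil, List.filter_append, pvStep]
    set M := (cols.map (·.2)).foldl max 0 with hM
    rcases lt_trichotomy M fv.2 with h | h | h
    · have hM' : max M fv.2 = fv.2 := max_eq_right h.le
      have hfil : cols.filter (fun x => x.2 == fv.2) = [] := by
        rw [List.filter_eq_nil_iff]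
        intro x hx
        have := hmax.2 x.2 (List.mem_map_of_mem hx)
        simp only [beq_iff_eq]
        omega
      have hone : PySem.Set.ofList [fv.1] = [fv.1] :=
        PySem.Set.ofList_eq_self_of_nodup [fv.1] (List.nodup_singleton fv.1)
      simp [h, hM', hfil, hone]
    · have hM' : max M fv.2 = M := by omega
      simp [← h, PySem.Set.ofList_append_singleton]
    · have hM' : max M fv.2 = M := max_eq_left h.le
      simp [hM', show ¬ fv.2 > M by omega, show ¬ fv.2 = M by omega]

-- keys are preserved by the main loop when every key hit is already present
lemma pvInner_keys (f : String) (L l : List (String × Int))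
    (d : PySem.Dict String (Int × List String))
    (h : ∀ q ∈ l, q.1 = "dishes" ∨ d.contains q.1 = true) :
    (l.foldl (pvInnerBody f L) d).keys = d.keys := by
  induction l generalizing d with
  | nil => simp
  | cons q l ih =>
    have hk : (pvInnerBody f L d q).keys = d.keys := by
      rcases h q (by simp) with hq | hq
      · simp [pvInnerBody, hq]
      · simp only [pvInnerBody]
        split_ifs <;> first | rfl | (exact PySem.Dict.keys_insert_of_contains _ _ hq)
    rw [List.foldl_cons, ih]
    · exact hk
    · intro q' hq'
      rcases h q' (List.mem_cons_of_mem _ hq') with hq | hq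
      · exact Or.inl hq
      · refine Or.inr ?_
        rw [PySem.Dict.contains_eq_decide_mem_keys, hk, ← PySem.Dict.contains_eq_decide_mem_keys]
        exact hq

lemma pvMain_keys (count : List (String × List (String × Int)))
    (d : PySem.Dict String (Int × List String))
    (h : ∀ p ∈ count, ∀ q ∈ p.2, q.1 = "dishes" ∨ d.contains q.1 = true) :
    (count.foldl (fun ml p => p.2.foldl (pvInnerBody p.1 p.2) ml) d).keys = d.keys := by
  induction count generalizing d with
  | nil => simp
  | cons p count ih =>
    have hk : (p.2.foldl (pvInnerBody p.1 p.2) d).keys = d.keys :=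
      pvInner_keys _ _ _ _ (h p (by simp))
    rw [List.foldl_cons, ih]
    · exact hk
    · intro p' hp' q hq
      rcases h p' (List.mem_cons_of_mem _ hp') q hq with hq' | hq'
      · exact Or.inl hq'
      · refine Or.inr ?_
        rw [PySem.Dict.contains_eq_decide_mem_keys, hk, ← PySem.Dict.contains_eq_decide_mem_keys]
        exact hq'

-- A's found_allergens loop is the ordered union of the stored food sets
lemma pvFound_fold (vals : List (Int × List String)) (s : List String) :
    vals.foldl (fun s i => i.2.foldl (fun s j => PySem.Set.add s j) s) s =
      PySem.Set.update s (vals.flatMap (·.2)) := by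
  induction vals generalizing s with
  | nil => simp [PySem.Set.update_nil]
  | cons i vals ih =>
    simp only [List.foldl_cons]
    have hin : List.foldl (fun s j => PySem.Set.add s j) s i.2 = PySem.Set.update s i.2 := by
      simpa using (PySem.Set.update_map_eq_foldl_add i.2 id s).symm
    rw [hin, ih, List.flatMap_cons, PySem.Set.update_append]

-- the two most_likely dicts are equal
lemma pvDict_eq (count : List (String × List (String × Int))) (allergens : List String)
    (hPre : Pre_find_allergens count allergens) :
    pvMainA count allergens = pvB count allergens := by
  have hinitkeys : ((allergens.foldl (fun d a => d.insert a ((0 : Int), ([] : List String)))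
      PySem.Dict.empty)).keys = PySem.Set.ofList allergens := by
    have h := PySem.Dict.keys_foldl_insert allergens
      (fun _ _ => ((0 : Int), ([] : List String))) PySem.Dict.empty
    simpa [PySem.Set.update_nil_left] using h
  have hBkeys : (pvB count allergens).keys = PySem.Set.ofList allergens := by
    have h := PySem.Dict.keys_foldl_insert allergens
      (fun _ a => pvVal count a) PySem.Dict.empty
    simpa [pvB, PySem.Set.update_nil_left] using h
  have hAkeys : (pvMainA count allergens).keys = PySem.Set.ofList allergens := by
    rw [pvMainA, pvMain_keys, hinitkeys]
    intro p hp q hq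
    rcases hPre p hp q hq with h | h
    · exact Or.inl h
    · refine Or.inr ?_
      rw [PySem.Dict.contains_eq_decide_mem_keys, hinitkeys]
      simp [PySem.Set.mem_ofList, h]
  apply PySem.Dict.ext
  rw [PySem.Dict.items_eq_map_keys _ (by rw [hAkeys]; exact PySem.Set.nodup_ofList _) (0, []),
    PySem.Dict.items_eq_map_keys _ (by rw [hBkeys]; exact PySem.Set.nodup_ofList _) (0, []),
    hAkeys, hBkeys]
  apply List.map_congr_left
  intro a hmem
  have ha : a ∈ allergens := (PySem.Set.mem_ofList _ _).mp hmem
  have hBa : (pvB count allergens).getD a (0, []) = pvVal count a := by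
    have h := pvGetD_foldl_insert allergens (fun a => pvVal count a) PySem.Dict.empty a
    simpa [pvB, ha] using h
  have hinita : ((allergens.foldl (fun d a => d.insert a ((0 : Int), ([] : List String)))
      PySem.Dict.empty)).getD a (0, []) = ((0 : Int), []) := by
    have h := pvGetD_foldl_insert allergens
      (fun _ => ((0 : Int), ([] : List String))) PySem.Dict.empty a
    simpa [ha] using h
  rw [pvMainA, pvMain_getD, hinita, pvStep_fold, hBa, pvVal]

theorem find_allergens_spec : Claim_equal_find_allergens := by
  intro count allergens _ hPre
  show find_allergens count allergens = find_allergens_alt count allergens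
  have h1 : find_allergens count allergens =
      ((pvMainA count allergens).values.foldl
          (fun s i => i.2.foldl (fun s j => PySem.Set.add s j) s) ([] : List String),
        (pvMainA count allergens).items) := rfl
  have h2 : find_allergens_alt count allergens =
      (PySem.Set.ofList ((pvB count allergens).values.flatMap (·.2)),
        (pvB count allergens).items) := rfl
  rw [h1, h2, pvDict_eq count allergens hPre, pvFound_fold, PySem.Set.update_nil_left]
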